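-- pv_equiv track=rewrite | github.com/Yulai202020/poker_python | combinations.py | idk
-- ===== SOURCE A (Python) =====
-- def idk(hand,desk):
--     a = desk + hand
--     g = {}
--     for i in [5,6]:
--         b = {}
--         for k in a:
--             if a[i][1] == k[1]:
--                 try:
--                     b[k[1]] += 1
--                 except:
--                     b[k[1]] = 1
--         for j in list(b.keys()):
--             g[j]=b[j]
--
--     return g
-- ===== SOURCE B (Python) =====
-- def idk(hand, desk):
--     a = desk + hand
--     cnt = {}
--     for card in a:
--         cnt[card[1]] = cnt.get(card[1], 0) + 1
--     g = {}
--     for i in (5, 6):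
--         g[a[i][1]] = cnt[a[i][1]]
--     return g
-- ===== Notes on version B (the rewrite author's own statement) =====
-- stated objective: simpler
-- what changed: Instead of re-scanning the whole card list once per index (A counts matches of a[i][1] with a fresh full pass for each i in [5,6]), B builds a single rank-frequency table over desk+hand in one pass and then fills the result with two table lookups.
-- outside the precondition, e.g. on idk([], []): A returns {}, B raises IndexError
import Mathlib
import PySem

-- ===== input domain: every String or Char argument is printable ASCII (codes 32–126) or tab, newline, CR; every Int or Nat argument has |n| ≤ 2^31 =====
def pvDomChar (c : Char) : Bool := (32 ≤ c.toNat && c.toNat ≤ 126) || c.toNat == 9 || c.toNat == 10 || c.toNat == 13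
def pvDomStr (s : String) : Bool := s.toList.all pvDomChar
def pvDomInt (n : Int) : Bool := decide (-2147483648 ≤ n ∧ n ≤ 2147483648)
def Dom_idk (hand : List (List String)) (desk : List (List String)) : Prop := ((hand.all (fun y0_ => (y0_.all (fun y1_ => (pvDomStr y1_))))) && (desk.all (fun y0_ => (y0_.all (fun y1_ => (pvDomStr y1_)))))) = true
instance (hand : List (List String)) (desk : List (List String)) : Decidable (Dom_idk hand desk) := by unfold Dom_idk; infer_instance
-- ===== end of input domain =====

-- B replaces A's two full counting scans of desk+hand (one scan per index 5 and 6) by a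
-- single rank-frequency table built in one pass plus two lookups (objective: simpler).

-- ===== PORT A =====
-- Python evaluates `a[i][1]` inside the inner loop, but it is loop-invariant, so the port
-- hoists it before the loop; where that lookup would raise IndexError (excluded by Pre_)
-- the port skips the iteration.
def idk (hand : List (List String)) (desk : List (List String)) : List (String × Int) :=
  let a := desk ++ hand
  (([5, 6] : List Int).foldl (fun g i =>
    match PySem.List.pyGet? a i with
    | none => g
    | some ci =>
      match PySem.List.pyGet? ci 1 with
      | none => g
      | some r =>
        let b := a.foldl (fun b k =>
          match PySem.List.pyGet? k 1 with
          | none => b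
          | some kr => if r = kr then b.insert kr (b.getD kr 0 + 1) else b)
          (PySem.Dict.empty)
        b.keys.foldl (fun g j => g.insert j (b.getD j 0)) g)
    (PySem.Dict.empty)).items

-- ===== PORT B =====
def idk_alt (hand : List (List String)) (desk : List (List String)) : List (String × Int) :=
  let a := desk ++ hand
  let cnt : PySem.Dict String Int := a.foldl (fun c k =>
    match PySem.List.pyGet? k 1 with
    | none => c
    | some r => c.insert r (c.getD r 0 + 1)) (PySem.Dict.empty)
  (([5, 6] : List Int).foldl (fun g i =>
    match PySem.List.pyGet? a i with
    | none => g
    | some ci =>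
      match PySem.List.pyGet? ci 1 with
      | none => g
      | some r => g.insert r (cnt.getD r 0))
    (PySem.Dict.empty)).items

-- ===== PRECONDITION & SPEC =====
-- Pre_ excludes the inputs where Python A raises IndexError (fewer than 7 cards in
-- desk+hand, or a card with fewer than 2 fields); this also excludes the single input
-- desk+hand = [], on which A skips its loops and returns {} by accident while B's
-- lookup a[5] raises IndexError.
def Pre_idk (hand : List (List String)) (desk : List (List String)) : Prop :=
  7 ≤ (desk ++ hand).length ∧ ∀ c ∈ desk ++ hand, 2 ≤ c.length
instance (hand : List (List String)) (desk : List (List String)) : Decidable (Pre_idk hand desk) := by unfold Pre_idk; infer_instance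

def pvWitness_idk : List (List String) × List (List String) :=
  ([["H", "2"], ["D", "3"]],
   [["S", "4"], ["C", "5"], ["H", "6"], ["D", "7"], ["S", "2"]])

def Spec_idk (hand : List (List String)) (desk : List (List String)) (out : List (String × Int)) : Prop := out = idk_alt hand desk
instance (hand : List (List String)) (desk : List (List String)) (out : List (String × Int)) : Decidable (Spec_idk hand desk out) := by unfold Spec_idk; infer_instance

-- ===== CLAIM (what is proved, stated in full; the proofs are below) =====
def Claim_equal_idk : Prop := ∀ (hand : List (List String)) (desk : List (List String)), Dom_idk hand desk → Pre_idk hand desk → Spec_idk hand desk (idk hand desk)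

-- ===== LEMMAS AND PROOFS =====

-- number of cards in l whose rank (second field) is r
def pvCntr (l : List (List String)) (r : String) : Int :=
  (l.countP (fun k => PySem.List.pyGet? k 1 == some r) : Nat)

lemma pvCntr_cons (k : List String) (l : List (List String)) (r : String) :
    pvCntr (k :: l) r
      = (if PySem.List.pyGet? k 1 == some r then 1 else 0) + pvCntr l r := by
  unfold pvCntr
  rw [List.countP_cons]
  split_ifs with h
  · push_cast
    ring
  · simp

-- A's inner counting loop started from the singleton dict {r: n} keeps the single key r
lemma pvInnerA_singleton (l : List (List String)) (r : String) (n : Int) :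
    l.foldl (fun b k =>
      match PySem.List.pyGet? k 1 with
      | none => b
      | some kr => if r = kr then b.insert kr (b.getD kr 0 + 1) else b)
      (PySem.Dict.empty.insert r n) = PySem.Dict.empty.insert r (n + pvCntr l r) := by
  induction l generalizing n with
  | nil => simp [pvCntr]
  | cons k l ih =>
    simp only [List.foldl_cons]
    cases hk : PySem.List.pyGet? k 1 with
    | none =>
      simp only [hk]
      rw [ih, pvCntr_cons, hk]
      simp
    | some kr =>
      simp only [hk]
      by_cases hr : r = kr
      · subst hr
        rw [if_pos rfl]
        have h1 : (PySem.Dict.empty.insert r n).insert r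
              ((PySem.Dict.empty.insert r n).getD r 0 + 1)
            = PySem.Dict.empty.insert r (n + 1) := by
          apply PySem.Dict.ext; simp [pysem]
        rw [h1, ih, pvCntr_cons, hk]
        simp
        ring_nf
      · rw [if_neg hr, ih, pvCntr_cons, hk]
        simp [Ne.symm hr]

-- A's inner counting loop from the empty dict, when at least one card matches
lemma pvInnerA_empty (l : List (List String)) (r : String) (h : pvCntr l r ≠ 0) :
    l.foldl (fun b k =>
      match PySem.List.pyGet? k 1 with
      | none => b
      | some kr => if r = kr then b.insert kr (b.getD kr 0 + 1) else b)
      (PySem.Dict.empty : PySem.Dict String Int)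
      = PySem.Dict.empty.insert r (pvCntr l r) := by
  induction l with
  | nil => exact (h (by simp [pvCntr])).elim
  | cons k l ih =>
    simp only [List.foldl_cons]
    cases hk : PySem.List.pyGet? k 1 with
    | none =>
      have h' : pvCntr l r ≠ 0 := by
        rw [pvCntr_cons, hk] at h; simpa using h
      simp only [hk]
      rw [ih h', pvCntr_cons, hk]
      simp
    | some kr =>
      simp only [hk]
      by_cases hr : r = kr
      · subst hr
        rw [if_pos rfl]
        have h0 : (PySem.Dict.empty : PySem.Dict String Int).insert r
              ((PySem.Dict.empty : PySem.Dict String Int).getD r 0 + 1)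
            = (PySem.Dict.empty : PySem.Dict String Int).insert r (0 + 1) := by
          apply PySem.Dict.ext; simp [pysem]
        rw [h0, pvInnerA_singleton, pvCntr_cons, hk]
        simp
      · have h' : pvCntr l r ≠ 0 := by
          rw [pvCntr_cons, hk] at h
          simpa [Ne.symm hr] using h
        rw [if_neg hr, ih h', pvCntr_cons, hk]
        simp [Ne.symm hr]

-- B's frequency table: the count stored for any rank r
lemma pvCnt_getD (l : List (List String)) (c : PySem.Dict String Int) (r : String) :
    (l.foldl (fun c k =>
      match PySem.List.pyGet? k 1 with
      | none => c
      | some kr => c.insert kr (c.getD kr 0 + 1)) c).getD r 0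
      = c.getD r 0 + pvCntr l r := by
  induction l generalizing c with
  | nil => simp [pvCntr]
  | cons k l ih =>
    simp only [List.foldl_cons]
    cases hk : PySem.List.pyGet? k 1 with
    | none =>
      simp only [hk]
      rw [ih, pvCntr_cons, hk]
      simp
    | some kr =>
      rw [ih, pvCntr_cons, hk]
      rw [PySem.Dict.getD_insert]
      by_cases hr : r = kr
      · subst hr
        simp
        ring
      · simp [hr, Ne.symm hr]

-- ===== VERDICT (by name: the statement is the Claim_ definition above) =====
set_option maxHeartbeats 1000000 in
theorem idk_spec : Claim_equal_idk := by
  intro hand desk _ hpre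
  obtain ⟨hlen, h2⟩ := hpre
  unfold Spec_idk idk idk_alt
  set a := desk ++ hand with ha
  have lt5 : 5 < a.length := by omega
  have lt6 : 6 < a.length := by omega
  have hl5 : 2 ≤ (a[5]'lt5).length := h2 _ (List.getElem_mem lt5)
  have hl6 : 2 ≤ (a[6]'lt6).length := h2 _ (List.getElem_mem lt6)
  have h5 : PySem.List.pyGet? a (5 : Int) = some (a[5]'lt5) := by
    rw [show (5 : Int) = ((5 : Nat) : Int) from rfl, PySem.List.pyGet?_natCast]
    exact List.getElem?_eq_getElem lt5
  have h6 : PySem.List.pyGet? a (6 : Int) = some (a[6]'lt6) := by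
    rw [show (6 : Int) = ((6 : Nat) : Int) from rfl, PySem.List.pyGet?_natCast]
    exact List.getElem?_eq_getElem lt6
  have hr5 : PySem.List.pyGet? (a[5]'lt5) (1 : Int)
      = some ((a[5]'lt5)[1]'(by omega)) := by
    rw [show (1 : Int) = ((1 : Nat) : Int) from rfl, PySem.List.pyGet?_natCast]
    exact List.getElem?_eq_getElem (by omega)
  have hr6 : PySem.List.pyGet? (a[6]'lt6) (1 : Int)
      = some ((a[6]'lt6)[1]'(by omega)) := by
    rw [show (1 : Int) = ((1 : Nat) : Int) from rfl, PySem.List.pyGet?_natCast]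
    exact List.getElem?_eq_getElem (by omega)
  set r5 := (a[5]'lt5)[1]'(by omega) with hr5d
  set r6 := (a[6]'lt6)[1]'(by omega) with hr6d
  have hc5 : pvCntr a r5 ≠ 0 := by
    unfold pvCntr
    intro h
    have h0 : a.countP (fun k => PySem.List.pyGet? k 1 == some r5) = 0 := by exact_mod_cast h
    rw [List.countP_eq_zero] at h0
    exact absurd (h0 _ (List.getElem_mem lt5)) (by simp [hr5])
  have hc6 : pvCntr a r6 ≠ 0 := by
    unfold pvCntr
    intro h
    have h0 : a.countP (fun k => PySem.List.pyGet? k 1 == some r6) = 0 := by exact_mod_cast h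
    rw [List.countP_eq_zero] at h0
    exact absurd (h0 _ (List.getElem_mem lt6)) (by simp [hr6])
  simp only [List.foldl_cons, List.foldl_nil, h5, h6, hr5, hr6,
    pvInnerA_empty a r5 hc5, pvInnerA_empty a r6 hc6, pvCnt_getD]
  simp [pysem]
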